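-- pv_equiv track=rewrite | github.com/jojeongmin304/Algorithm_Problem_Solving | 프로그래머스/1/42840. 모의고사/모의고사.py | solution
-- ===== SOURCE A (Python) =====
-- def solution(answers):
--     answer = []
--
--     answerOne = [1, 2, 3, 4, 5]
--     countOne = 0
--
--     answerTwo = [2, 1, 2, 3, 2, 4, 2, 5]
--     countTwo = 0
--
--     answerThree = [3, 3, 1, 1, 2, 2, 4, 4, 5, 5]
--     countThree = 0
--
--     for i in range(0, len(answers)):
--         if (answers[i] == answerOne[i % 5]): countOne += 1;
--         if (answers[i] == answerTwo[i % 8]): countTwo += 1;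
--         if (answers[i] == answerThree[i % 10]): countThree += 1;
--
--     temp = []
--     temp.append(countOne);
--     temp.append(countTwo);
--     temp.append(countThree);
--     maxScore = max(temp)
--
--     for i in range(0,3):
--         if (maxScore == temp[i]):
--             answer.append(i+1)
--
--     return answer
-- ===== SOURCE B (Python) =====
-- def solution(answers):
--     # histogram over (position mod 40, answer); 40 = lcm(5, 8, 10)
--     cnt = {}
--     for i, a in enumerate(answers):
--         k = (i % 40, a)
--         cnt[k] = cnt.get(k, 0) + 1
--     patterns = [[1, 2, 3, 4, 5], [2, 1, 2, 3, 2, 4, 2, 5], [3, 3, 1, 1, 2, 2, 4, 4, 5, 5]]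
--     scores = [sum(cnt.get((j, p[j % len(p)]), 0) for j in range(40)) for p in patterns]
--     m = max(scores)
--     return [i + 1 for i, s in enumerate(scores) if s == m]
-- ===== Notes on version B (the rewrite author's own statement) =====
-- stated objective: alternative
-- what changed: Replaced A's per-position comparison loop with three modular-indexed checks per element by a histogram algorithm: one pass builds a dict counting (i % 40, answer) pairs (40 = lcm of the pattern lengths), then each taker's score is a fixed 40-term lookup sum over that table, followed by the same argmax collection.
import Mathlib
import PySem

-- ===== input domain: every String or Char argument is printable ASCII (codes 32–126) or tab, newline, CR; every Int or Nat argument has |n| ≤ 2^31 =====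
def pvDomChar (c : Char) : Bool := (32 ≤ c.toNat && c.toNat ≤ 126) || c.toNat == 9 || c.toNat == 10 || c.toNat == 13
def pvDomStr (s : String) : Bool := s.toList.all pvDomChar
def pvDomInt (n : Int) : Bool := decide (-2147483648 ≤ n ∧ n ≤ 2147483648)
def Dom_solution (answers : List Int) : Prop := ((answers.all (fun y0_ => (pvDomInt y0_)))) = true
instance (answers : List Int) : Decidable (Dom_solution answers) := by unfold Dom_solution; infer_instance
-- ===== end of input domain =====

-- B replaces A's per-position comparison loop by a histogram: one dict keyed by
-- (i % 40, answer) built in a single pass, then each taker's score is a 40-term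
-- table-lookup sum; objective: alternative (same O(n) cost, different algorithm).

-- ===== PORT A =====
def solution (answers : List Int) : List Int :=
  let answerOne : List Int := [1, 2, 3, 4, 5]
  let answerTwo : List Int := [2, 1, 2, 3, 2, 4, 2, 5]
  let answerThree : List Int := [3, 3, 1, 1, 2, 2, 4, 4, 5, 5]
  -- the loop index i is always in range (i < len(answers)), so answers[i] is ported as getD i 0
  let counts : Int × Int × Int := (List.range answers.length).foldl
    (fun s i =>
      (if answers.getD i 0 == answerOne.getD (i % 5) 0 then s.1 + 1 else s.1,
       if answers.getD i 0 == answerTwo.getD (i % 8) 0 then s.2.1 + 1 else s.2.1,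
       if answers.getD i 0 == answerThree.getD (i % 10) 0 then s.2.2 + 1 else s.2.2))
    (0, 0, 0)
  let temp : List Int := [counts.1, counts.2.1, counts.2.2]
  let maxScore : Int := (PySem.List.max? temp (fun x => x)).getD 0
  (List.range 3).foldl
    (fun answer i => if maxScore == temp.getD i 0 then answer ++ [(i : Int) + 1] else answer) []

-- ===== PORT B =====
def solution_alt (answers : List Int) : List Int :=
  -- cnt[k] = cnt.get(k, 0) + 1 over enumerate(answers), k = (i % 40, a)
  let cnt : PySem.Dict (Int × Int) Int :=
    (PySem.List.enumerate answers).foldl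
      (fun d p =>
        let k : Int × Int := (PySem.Int.mod p.1 40, p.2)
        d.insert k (d.getD k 0 + 1))
      PySem.Dict.empty
  let patterns : List (List Int) :=
    [[1, 2, 3, 4, 5], [2, 1, 2, 3, 2, 4, 2, 5], [3, 3, 1, 1, 2, 2, 4, 4, 5, 5]]
  let scores : List Int := patterns.map (fun p =>
    (List.range 40).foldl (fun s j => s + cnt.getD (((j : Nat) : Int), p.getD (j % p.length) 0) 0) 0)
  let m : Int := (PySem.List.max? scores (fun x => x)).getD 0
  ((PySem.List.enumerate scores).filter (fun q => q.2 == m)).map (fun q => q.1 + 1)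

-- ===== PRECONDITION & SPEC =====
def Spec_solution (answers : List Int) (out : List Int) : Prop := out = solution_alt answers
instance (answers : List Int) (out : List Int) : Decidable (Spec_solution answers out) := by unfold Spec_solution; infer_instance

-- ===== CLAIM (what is proved, stated in full; the proofs are below) =====
def Claim_equal_solution : Prop := ∀ (answers : List Int), Dom_solution answers → Spec_solution answers (solution answers)

-- ===== LEMMAS AND PROOFS =====

/-- A's triple-counter loop splits into three independent counts. -/
theorem pv_fold3 (f g h : Nat → Bool) (l : List Nat) (a b c : Int) :
    l.foldl
      (fun (s : Int × Int × Int) i =>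
        (if f i then s.1 + 1 else s.1,
         if g i then s.2.1 + 1 else s.2.1,
         if h i then s.2.2 + 1 else s.2.2)) (a, b, c)
    = (a + l.countP f, b + l.countP g, c + l.countP h) := by
  induction l generalizing a b c with
  | nil => simp
  | cons x t ih =>
    simp only [List.foldl_cons, List.countP_cons, ih]
    split_ifs <;> refine Prod.ext ?_ (Prod.ext ?_ ?_) <;> simp <;> omega

/-- foldl-accumulated addition is a sum of a map. -/
theorem pv_foldl_add (l : List Nat) (g : Nat → Int) (a : Int) :
    l.foldl (fun s j => s + g j) a = a + (l.map g).sum := by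
  induction l generalizing a with
  | nil => simp
  | cons x t ih => simp [ih]; ring

/-- sum of 0/1 indicators is countP. -/
theorem pv_sum_indicator {α : Type} (l : List α) (q : α → Prop) [DecidablePred q] :
    (l.map (fun x => if q x then (1 : Nat) else 0)).sum = l.countP (fun x => decide (q x)) := by
  induction l with
  | nil => simp
  | cons x t ih => by_cases h : q x <;> simp [h, ih, Nat.add_comm]

/-- the indicator count over the 40 residues. -/
theorem pv_range40_count (p : Int × Int) (f : Nat → Int) :
    (List.range 40).countP (fun j => decide (p = (((j : Nat) : Int), f j)))
      = if (0 ≤ p.1 ∧ p.1 < 40) ∧ p.2 = f p.1.toNat then 1 else 0 := by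
  by_cases hc : (0 ≤ p.1 ∧ p.1 < 40) ∧ p.2 = f p.1.toNat
  · rw [if_pos hc]
    obtain ⟨⟨h0, h40⟩, hv⟩ := hc
    have hcong : ∀ j ∈ List.range 40,
        ((decide (p = (((j : Nat) : Int), f j))) = true ↔ (j == p.1.toNat) = true) := by
      intro j hj
      rw [List.mem_range] at hj
      rcases p with ⟨p1, p2⟩
      simp only at h0 h40 hv
      by_cases hje : j = p1.toNat
      · subst hje
        simp [Int.toNat_of_nonneg h0, hv]
      · have hne : p1 ≠ ((j : Nat) : Int) := by omega
        simp [Prod.ext_iff, hne, hje]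
    rw [List.countP_congr hcong]
    have hmem : p.1.toNat ∈ List.range 40 := by rw [List.mem_range]; omega
    exact List.count_eq_one_of_mem List.nodup_range hmem
  · rw [if_neg hc]
    apply List.countP_eq_zero.mpr
    intro j hj
    rw [List.mem_range] at hj
    simp only [decide_eq_true_eq]
    intro he
    rcases p with ⟨p1, p2⟩
    rw [Prod.ext_iff] at he
    simp only at he
    apply hc
    refine ⟨⟨by omega, by omega⟩, ?_⟩
    simp only [he.1, he.2, Int.toNat_natCast]

/-- summing the table over the 40 residues counts exactly the matching pairs. -/
theorem pv_sum_count (l : List (Int × Int)) (f : Nat → Int) :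
    ((List.range 40).map (fun j => l.count (((j : Nat) : Int), f j))).sum
      = l.countP (fun p => decide (0 ≤ p.1 ∧ p.1 < 40) && (p.2 == f p.1.toNat)) := by
  induction l with
  | nil => simp
  | cons p t ih =>
    have hstep : ∀ j : Nat, (p :: t).count (((j : Nat) : Int), f j)
        = t.count (((j : Nat) : Int), f j)
          + (if p = (((j : Nat) : Int), f j) then 1 else 0) := by
      intro j
      simp [List.count_cons]
    simp only [hstep]
    rw [List.sum_map_add, ih,
      pv_sum_indicator (List.range 40) (fun j => p = (((j : Nat) : Int), f j)),
      pv_range40_count p f, List.countP_cons]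
    have hite : (if ((decide (0 ≤ p.1 ∧ p.1 < 40) && (p.2 == f p.1.toNat)) = true) then (1 : Nat) else 0)
        = (if (0 ≤ p.1 ∧ p.1 < 40) ∧ p.2 = f p.1.toNat then 1 else 0) := by
      by_cases hc : (0 ≤ p.1 ∧ p.1 < 40) ∧ p.2 = f p.1.toNat <;> simp [hc]
    rw [hite]

/-- countP over enumerate = countP over indices. -/
theorem pv_countP_enumerate (xs : List Int) (s : Int) (P : Int × Int → Bool) :
    (PySem.List.enumerate xs s).countP P
      = (List.range xs.length).countP (fun (i : Nat) => P (s + (i : Int), xs.getD i 0)) := by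
  induction xs generalizing s with
  | nil => simp [PySem.List.enumerate]
  | cons x t ih =>
    rw [PySem.List.enumerate_cons, List.countP_cons]
    simp only [List.length_cons, List.range_succ_eq_map, List.countP_cons, List.countP_map,
      Function.comp_def, List.getD_cons_succ, List.getD_cons_zero]
    rw [ih (s + 1)]
    congr 1
    · apply List.countP_congr
      intro i _
      have h : s + 1 + (i : Int) = s + ((i.succ : Nat) : Int) := by push_cast; ring
      rw [h]
    · norm_num

/-- The per-pattern table score equals the per-position match count. -/
theorem pv_table_score (answers pat : List Int) (hp : pat.length ∣ 40) :
    (List.range 40).foldl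
      (fun s j => s + (PySem.Dict.counter
          ((PySem.List.enumerate answers).map (fun p => (PySem.Int.mod p.1 40, p.2)))).getD
          (((j : Nat) : Int), pat.getD (j % pat.length) 0) 0) 0
    = ((List.range answers.length).countP
        (fun i => answers.getD i 0 == pat.getD (i % pat.length) 0) : Nat) := by
  set keyed := (PySem.List.enumerate answers).map (fun p => (PySem.Int.mod p.1 40, p.2)) with hk
  have hget : ∀ j : Nat, (PySem.Dict.counter keyed).getD (((j : Nat) : Int), pat.getD (j % pat.length) 0) 0
      = (keyed.count (((j : Nat) : Int), pat.getD (j % pat.length) 0) : Int) := by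
    intro j; rw [PySem.Dict.getD_counter]
  simp only [hget]
  rw [pv_foldl_add (List.range 40)
    (fun j => (keyed.count (((j : Nat) : Int), pat.getD (j % pat.length) 0) : Int)) 0, zero_add]
  rw [show ((List.range 40).map (fun j => (keyed.count (((j : Nat) : Int), pat.getD (j % pat.length) 0) : Int))).sum
      = (((List.range 40).map (fun j => keyed.count (((j : Nat) : Int), pat.getD (j % pat.length) 0))).sum : Int) by
    rw [Nat.cast_list_sum, List.map_map]; rfl]
  rw [pv_sum_count keyed (fun j => pat.getD (j % pat.length) 0)]
  congr 1
  rw [hk, List.countP_map]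
  rw [pv_countP_enumerate answers 0 _]
  apply List.countP_congr
  intro i hi
  rw [List.mem_range] at hi
  simp only [Function.comp_def]
  have hmod : PySem.Int.mod (0 + (i : Int)) 40 = (((i % 40 : Nat)) : Int) := by
    rw [PySem.Int.mod_eq_emod_of_pos (by norm_num : (0:Int) < 40)]
    push_cast
    omega
  simp only [hmod]
  have h1 : (0 : Int) ≤ ((i % 40 : Nat) : Int) := by positivity
  have h2 : (((i % 40 : Nat)) : Int) < 40 := by
    have := Nat.mod_lt i (show 0 < 40 by norm_num)
    omega
  have h3 : (((i % 40 : Nat) : Int)).toNat = i % 40 := by omega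
  simp only [h1, h2, h3, and_self, decide_true, Bool.true_and]
  rw [Nat.mod_mod_of_dvd i hp]

/-- The tail of both programs agrees for any three scores. -/
theorem pv_tail (c1 c2 c3 : Int) :
    (List.range 3).foldl
      (fun answer i =>
        if (PySem.List.max? [c1, c2, c3] (fun x => x)).getD 0 == [c1, c2, c3].getD i 0
        then answer ++ [(i : Int) + 1] else answer) []
    = ((PySem.List.enumerate [c1, c2, c3]).filter
        (fun p => p.2 == (PySem.List.max? [c1, c2, c3] (fun x => x)).getD 0)).map
        (fun p => p.1 + 1) := by
  simp only [show List.range 3 = [0, 1, 2] from rfl, List.foldl_cons, List.foldl_nil,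
    PySem.List.enumerate_cons, PySem.List.enumerate_nil, List.filter_cons, List.filter_nil,
    List.getD_cons_zero, List.getD_cons_succ, beq_iff_eq]
  generalize (PySem.List.max? [c1, c2, c3] (fun x => x)).getD 0 = m
  simp only [show (c1 = m) ↔ (m = c1) from eq_comm, show (c2 = m) ↔ (m = c2) from eq_comm,
    show (c3 = m) ↔ (m = c3) from eq_comm]
  split_ifs <;> simp

-- ===== VERDICT (by name: the statement is the Claim_ definition above) =====
theorem solution_spec : Claim_equal_solution := by
  intro answers _
  show solution answers = solution_alt answers
  simp only [solution, solution_alt]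
  rw [pv_fold3]
  simp only [zero_add]
  -- turn B's insert-loop into a counter of the keyed list
  rw [show (PySem.List.enumerate answers).foldl
      (fun d p =>
        let k : Int × Int := (PySem.Int.mod p.1 40, p.2)
        d.insert k (d.getD k 0 + 1)) PySem.Dict.empty
    = PySem.Dict.counter ((PySem.List.enumerate answers).map (fun p => (PySem.Int.mod p.1 40, p.2))) by
    rw [← PySem.Dict.foldl_insert_getD_add_one_eq_counter, List.foldl_map]]
  simp only [List.map_cons, List.map_nil]
  rw [pv_table_score answers [1, 2, 3, 4, 5] (by norm_num),
    pv_table_score answers [2, 1, 2, 3, 2, 4, 2, 5] (by norm_num),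
    pv_table_score answers [3, 3, 1, 1, 2, 2, 4, 4, 5, 5] (by norm_num)]
  exact pv_tail _ _ _
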